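-- pv_equiv track=rewrite | github.com/junsoopablo/L1-m6A-polyA | analysis/topic_08_sequence_features/stress_resilience_sequence_features.py | compute_kmer_counts
-- ===== SOURCE A (Python) =====
-- from collections import Counter
--
-- def compute_kmer_counts(seq, k=3):
--     """Count k-mers in sequence (DNA alphabet: ACGT)."""
--     counts = Counter()
--     seq_upper = seq.upper()
--     for i in range(len(seq_upper) - k + 1):
--         kmer = seq_upper[i:i+k]
--         if all(c in 'ACGT' for c in kmer):
--             counts[kmer] += 1
--     return counts
-- ===== SOURCE B (Python) =====
-- from collections import Counter
--
-- def compute_kmer_counts(seq, k=3):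
--     """Count k-mers in sequence (DNA alphabet: ACGT).
--
--     Scans maximal runs of valid ACGT characters; every window inside a run
--     is valid by construction, so no per-window validity check is needed."""
--     counts = Counter()
--     s = seq.upper()
--     n = len(s)
--     i = 0
--     while i < n:
--         if s[i] in 'ACGT':
--             j = i + 1
--             while j < n and s[j] in 'ACGT':
--                 j += 1
--             run = s[i:j]
--             for t in range(len(run) - k + 1):
--                 counts[run[t:t+k]] += 1
--             i = j
--         else:
--             i += 1
--     return counts
-- ===== Notes on version B (the rewrite author's own statement) =====
-- stated objective: alternative
-- what changed: Instead of slicing and validity-checking every window of the whole sequence, B scans the sequence once for maximal runs of ACGT characters and counts every window inside each run without any per-window validity check.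
-- outside the precondition, e.g. on compute_kmer_counts('XY', 0): A returns {'': 3}, B returns {}
import Mathlib
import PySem

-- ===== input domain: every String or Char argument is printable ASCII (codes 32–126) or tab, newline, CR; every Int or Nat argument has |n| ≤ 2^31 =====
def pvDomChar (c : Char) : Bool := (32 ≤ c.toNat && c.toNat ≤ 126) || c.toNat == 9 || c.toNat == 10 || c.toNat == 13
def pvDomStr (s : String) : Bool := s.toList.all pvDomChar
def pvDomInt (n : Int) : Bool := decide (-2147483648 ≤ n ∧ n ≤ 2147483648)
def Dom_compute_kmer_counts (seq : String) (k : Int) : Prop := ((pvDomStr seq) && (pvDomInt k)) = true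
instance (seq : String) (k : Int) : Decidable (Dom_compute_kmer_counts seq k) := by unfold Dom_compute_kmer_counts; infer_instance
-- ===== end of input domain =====

-- B counts k-mers by scanning maximal ACGT runs instead of validity-checking every window; alternative decomposition, same results for k ≥ 1.

-- ===== PORT A =====
-- c in 'ACGT' for a single character c (exact: membership of a 1-char string in 'ACGT')
def pvACGT (c : Char) : Bool := c == 'A' || c == 'C' || c == 'G' || c == 'T'

def compute_kmer_counts (seq : String) (k : Int) : List (String × Int) :=
  let su : List Char := (PySem.Str.upper seq).toList
  let n : Int := su.length
  ((PySem.List.pyRange 0 (n - k + 1) 1).foldl (fun d i =>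
    let kmer := PySem.List.slice su (some i) (some (i + k))
    if kmer.all pvACGT then d.modify (String.ofList kmer) 0 (· + 1) else d)
  PySem.Dict.empty).items

-- ===== PORT B =====
-- inner 'for t in range(len(run) - k + 1): counts[run[t:t+k]] += 1'
def pvCountRun (k : Int) (run : List Char) (d : PySem.Dict String Int) : PySem.Dict String Int :=
  (PySem.List.pyRange 0 ((run.length : Int) - k + 1) 1).foldl (fun d t =>
    d.modify (String.ofList (PySem.List.slice run (some t) (some (t + k)))) 0 (· + 1)) d

-- the outer while-loop: skip an invalid char, or consume a maximal valid run and count it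
def pvAltGo (k : Int) : List Char → PySem.Dict String Int → PySem.Dict String Int
  | [], d => d
  | c :: rest, d =>
    if pvACGT c then
      pvAltGo k (rest.dropWhile pvACGT) (pvCountRun k (c :: rest.takeWhile pvACGT) d)
    else
      pvAltGo k rest d
termination_by cs _ => cs.length
decreasing_by
  · exact Nat.lt_succ_of_le (List.length_dropWhile_le _ _)
  · exact Nat.lt_succ_self _

def compute_kmer_counts_alt (seq : String) (k : Int) : List (String × Int) :=
  (pvAltGo k (PySem.Str.upper seq).toList PySem.Dict.empty).items

-- ===== PRECONDITION & SPEC =====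
-- Pre_ excludes k ≤ 0, outside the natural domain of k-mer counting, where A counts
-- empty (or negative-stop) slices as 'valid k-mers' — an artefact of Python slicing
-- that B's run-based scan naturally does not reproduce.
def Pre_compute_kmer_counts (seq : String) (k : Int) : Prop := 1 ≤ k
instance (seq : String) (k : Int) : Decidable (Pre_compute_kmer_counts seq k) := by
  unfold Pre_compute_kmer_counts; infer_instance

def pvWitness_compute_kmer_counts : String × Int := ("acgTxACG", 3)

def Spec_compute_kmer_counts (seq : String) (k : Int) (out : List (String × Int)) : Prop :=
  out = compute_kmer_counts_alt seq k
instance (seq : String) (k : Int) (out : List (String × Int)) :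
    Decidable (Spec_compute_kmer_counts seq k out) := by
  unfold Spec_compute_kmer_counts; infer_instance

-- ===== CLAIM (what is proved, stated in full; the proofs are below) =====
def Claim_equal_compute_kmer_counts : Prop := ∀ (seq : String) (k : Int),
  Dom_compute_kmer_counts seq k → Pre_compute_kmer_counts seq k →
  Spec_compute_kmer_counts seq k (compute_kmer_counts seq k)

-- ===== LEMMAS AND PROOFS =====

-- increment the counter at window w
def pvIncr (d : PySem.Dict String Int) (w : List Char) : PySem.Dict String Int :=
  d.modify (String.ofList w) 0 (· + 1)

-- the list of valid K-windows of cs, emitted left to right (K ≥ 1 throughout)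
def pvWins (K : Nat) : List Char → List (List Char)
  | [] => []
  | c :: cs =>
    (if K ≤ (c :: cs).length ∧ ((c :: cs).take K).all pvACGT then [(c :: cs).take K] else [])
      ++ pvWins K cs

-- all K-windows of a run (no validity check)
def pvRunW (K : Nat) (run : List Char) : List (List Char) :=
  (List.range ((run.length + 1) - K)).map (fun t => (run.drop t).take K)

theorem pv_foldl_if_filterMap {α β γ : Type} (g : γ → β → γ) (f : α → Option β) :
    ∀ (l : List α) (d : γ),
      l.foldl (fun d a => match f a with | some w => g d w | none => d) d =
      (l.filterMap f).foldl g d := by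
  intro l
  induction l with
  | nil => intro d; rfl
  | cons a l ih =>
    intro d
    simp only [List.foldl_cons]
    cases h : f a <;> simp [h, ih]


-- index-based form of the valid-window list
def pvWinsIdx (K : Nat) (cs : List Char) : List (List Char) :=
  (List.range ((cs.length + 1) - K)).filterMap (fun j =>
    if ((cs.drop j).take K).all pvACGT then some ((cs.drop j).take K) else none)

theorem pvWinsIdx_eq (K : Nat) (hK : 1 ≤ K) : ∀ cs, pvWinsIdx K cs = pvWins K cs := by
  intro cs
  induction cs with
  | nil => simp [pvWinsIdx, pvWins, Nat.sub_eq_zero_of_le hK]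
  | cons c cs ih =>
    by_cases h : K ≤ cs.length + 1
    · have hm : (c :: cs).length + 1 - K = ((cs.length + 1) - K) + 1 := by
        simp only [List.length_cons]; omega
      rw [pvWinsIdx, hm, List.range_succ_eq_map, List.filterMap_cons, List.filterMap_map]
      rw [pvWins, ← ih, pvWinsIdx]
      have hcomp : ∀ j : Nat, (((c :: cs).drop (j + 1)).take K) = ((cs.drop j).take K) := by
        intro j; rfl
      simp only [List.drop_zero, Nat.succ_eq_add_one, Function.comp_def, hcomp]
      have hlen : K ≤ (c :: cs).length := by simp; omega
      by_cases hv : ((c :: cs).take K).all pvACGT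
      · simp [hv, h]
      · simp [hv, h]
    · have hm : (c :: cs).length + 1 - K = 0 := by simp only [List.length_cons]; omega
      have hm' : cs.length + 1 - K = 0 := by omega
      rw [pvWinsIdx, hm]
      rw [pvWins, ← ih, pvWinsIdx, hm']
      simp only [List.filterMap_nil, List.range_zero]
      have hlen : ¬ (K ≤ (c :: cs).length) := by simp; omega
      simp only [hlen, false_and, if_false, List.nil_append]

theorem pv_slice_window (su : List Char) (k : Int) (hk : 1 ≤ k) (j : Nat) :
    PySem.List.slice su (some ((j : Int))) (some ((j : Int) + k)) = (su.drop j).take k.toNat := by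
  rw [PySem.List.slice_toNat su (by omega) (by omega)]
  simp only [Int.toNat_natCast]
  congr 1
  omega

theorem pvA_eq (seq : String) (k : Int) (hk : 1 ≤ k) :
    compute_kmer_counts seq k =
      (List.foldl pvIncr PySem.Dict.empty (pvWins k.toNat (PySem.Str.upper seq).toList)).items := by
  simp only [compute_kmer_counts]
  congr 1
  rw [PySem.List.pyRange_one, List.foldl_map]
  simp only [zero_add, pv_slice_window _ k hk]
  rw [show (((PySem.Str.upper seq).toList.length : Int) - k + 1 - 0).toNat
        = ((PySem.Str.upper seq).toList.length + 1) - k.toNat from by omega]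
  rw [← pvWinsIdx_eq k.toNat (by omega) _, pvWinsIdx, ← pv_foldl_if_filterMap]
  congr 1
  funext d j
  by_cases hv : (List.take k.toNat (List.drop j (PySem.Str.upper seq).toList)).all pvACGT = true
  · rw [if_pos hv, if_pos hv]
    rfl
  · rw [if_neg hv, if_neg hv]

theorem pvCountRun_eq (k : Int) (hk : 1 ≤ k) (run : List Char) (d : PySem.Dict String Int) :
    pvCountRun k run d = List.foldl pvIncr d (pvRunW k.toNat run) := by
  unfold pvCountRun pvRunW
  rw [PySem.List.pyRange_one, List.foldl_map, List.foldl_map]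
  simp only [zero_add, pv_slice_window run k hk]
  rw [show (((run.length : Int)) - k + 1 - 0).toNat = (run.length + 1) - k.toNat from by omega]
  rfl

theorem pvRunW_cons (K : Nat) (c : Char) (r : List Char) :
    pvRunW K (c :: r) = (if K ≤ (c :: r).length then [(c :: r).take K] else []) ++ pvRunW K r := by
  by_cases h : K ≤ r.length + 1
  · rw [pvRunW, show (c :: r).length + 1 - K = (r.length + 1 - K) + 1 from by simp; omega,
      List.range_succ_eq_map, List.map_cons, List.map_map]
    have hcomp : ∀ j : Nat, ((c :: r).drop (j + 1)).take K = (r.drop j).take K := fun _ => rfl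
    simp only [List.drop_zero, Function.comp_def, hcomp]
    have h' : K ≤ (c :: r).length := by simp; omega
    rw [if_pos h']
    rfl
  · have h1 : (c :: r).length + 1 - K = 0 := by simp; omega
    have h2 : r.length + 1 - K = 0 := by omega
    have h' : ¬ K ≤ (c :: r).length := by simp; omega
    rw [pvRunW, pvRunW, h1, h2, if_neg h']
    rfl

theorem pv_all_take {K : Nat} {l : List Char} (h : l.all pvACGT = true) :
    (l.take K).all pvACGT = true := by
  rw [List.all_eq_true] at h ⊢
  exact fun x hx => h x (List.mem_of_mem_take hx)

theorem pvWins_append (K : Nat) (hK : 1 ≤ K) (rest : List Char)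
    (hrest : ∀ c', rest.head? = some c' → pvACGT c' = false) :
    ∀ run, run.all pvACGT = true → pvWins K (run ++ rest) = pvRunW K run ++ pvWins K rest := by
  intro run
  induction run with
  | nil =>
    intro _
    simp [pvRunW, Nat.sub_eq_zero_of_le hK]
  | cons c r ih =>
    intro hall
    rw [List.all_cons, Bool.and_eq_true] at hall
    obtain ⟨hc, hr⟩ := hall
    rw [List.cons_append, pvWins, ih hr, pvRunW_cons K, List.append_assoc]
    congr 1
    by_cases hlen : K ≤ r.length + 1
    · have htake : (c :: (r ++ rest)).take K = (c :: r).take K := by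
        rw [← List.cons_append, List.take_append,
          show K - (c :: r).length = 0 from by simp; omega, List.take_zero, List.append_nil]
      have hall2 : ((c :: r).take K).all pvACGT = true := by
        apply pv_all_take
        simp [hc, hr]
      have hL : K ≤ (c :: (r ++ rest)).length := by simp; omega
      have hL' : K ≤ (c :: r).length := by simp; omega
      rw [htake, if_pos ⟨hL, hall2⟩, if_pos hL']
    · have hL' : ¬ K ≤ (c :: r).length := by simp; omega
      rw [if_neg hL']
      cases hrest2 : rest with
      | nil =>
        subst hrest2
        have hng : ¬ K ≤ (c :: (r ++ ([] : List Char))).length := by simp; omega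
        rw [if_neg (fun hh => hng hh.1)]
      | cons c' t =>
        subst hrest2
        have hc' : pvACGT c' = false := hrest c' rfl
        have htake : (c :: (r ++ (c' :: t))).take K
            = (c :: r) ++ (c' :: t).take (K - (r.length + 1)) := by
          rw [← List.cons_append, List.take_append,
            show (c :: r).take K = c :: r from List.take_of_length_le (by simp; omega)]
          simp
        have hmem : c' ∈ (c :: (r ++ (c' :: t))).take K := by
          rw [htake]
          refine List.mem_append_right _ ?_
          rw [show K - (r.length + 1) = (K - (r.length + 1) - 1) + 1 from by omega,
            List.take_succ_cons]
          exact List.mem_cons_self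
        have hallF : ¬ (((c :: (r ++ (c' :: t))).take K).all pvACGT = true) := by
          rw [List.all_eq_true]
          intro hAll
          have := hAll c' hmem
          rw [hc'] at this
          exact Bool.false_ne_true this
        rw [if_neg (by intro hh; exact hallF hh.2)]

theorem pv_dropWhile_head {α : Type} (p : α → Bool) :
    ∀ (l : List α) (c' : α), (l.dropWhile p).head? = some c' → p c' = false := by
  intro l
  induction l with
  | nil => intro c' h; simp [List.dropWhile] at h
  | cons a l ih =>
    intro c' h
    by_cases hp : p a
    · rw [List.dropWhile_cons, if_pos hp] at h
      exact ih c' h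
    · rw [List.dropWhile_cons, if_neg hp] at h
      simp at h
      subst h
      exact Bool.of_not_eq_true hp

theorem pv_all_takeWhile (l : List Char) : (l.takeWhile pvACGT).all pvACGT = true := by
  rw [List.all_eq_true]
  exact fun x hx => List.mem_takeWhile_imp hx

theorem pvAltGo_eq (k : Int) (hk : 1 ≤ k) :
    ∀ (n : Nat) (cs : List Char) (d : PySem.Dict String Int), cs.length ≤ n →
      pvAltGo k cs d = List.foldl pvIncr d (pvWins k.toNat cs) := by
  have hK : 1 ≤ k.toNat := by omega
  intro n
  induction n with
  | zero =>
    intro cs d h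
    rw [List.length_eq_zero_iff.mp (Nat.le_zero.mp h)]
    simp only [pvAltGo, pvWins, List.foldl_nil]
  | succ n ihn =>
    intro cs d h
    cases cs with
    | nil => simp only [pvAltGo, pvWins, List.foldl_nil]
    | cons c rest =>
      by_cases hc : pvACGT c
      · rw [pvAltGo, if_pos hc]
        have hlen : (rest.dropWhile pvACGT).length ≤ n := by
          have := List.length_dropWhile_le pvACGT rest
          simp at h
          omega
        rw [ihn _ _ hlen, pvCountRun_eq k hk, ← List.foldl_append]
        have hrun : (c :: rest.takeWhile pvACGT).all pvACGT = true := by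
          simp only [List.all_cons, hc, Bool.true_and]
          exact pv_all_takeWhile rest
        rw [← pvWins_append k.toNat hK _ (pv_dropWhile_head pvACGT rest) _ hrun,
          List.cons_append, List.takeWhile_append_dropWhile]
      · rw [pvAltGo, if_neg hc]
        have hlen : rest.length ≤ n := by simp at h; omega
        rw [ihn _ _ hlen]
        have hwins : pvWins k.toNat (c :: rest) = pvWins k.toNat rest := by
          rw [pvWins]
          obtain ⟨K', hK'⟩ : ∃ K', k.toNat = K' + 1 := ⟨k.toNat - 1, by omega⟩
          rw [if_neg ?_, List.nil_append]
          intro hh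
          have hall := hh.2
          rw [hK', List.take_succ_cons, List.all_cons, Bool.and_eq_true] at hall
          exact hc hall.1
        rw [hwins]

-- ===== VERDICT (by name: the statement is the Claim_ definition above) =====
theorem compute_kmer_counts_spec : Claim_equal_compute_kmer_counts := by
  intro seq k _ hpre
  have hk : 1 ≤ k := hpre
  show compute_kmer_counts seq k = compute_kmer_counts_alt seq k
  rw [pvA_eq seq k hk]
  unfold compute_kmer_counts_alt
  rw [pvAltGo_eq k hk (PySem.Str.upper seq).toList.length _ _ le_rfl]
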